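-- pv_equiv track=rewrite | github.com/CAT6e/ThaiTrend-Emoji | main.py | typing_behavior
-- ===== SOURCE A (Python) =====
-- def typing_behavior(emoji_list, output_dict):
-- 	""" Record typing behavior """
-- 	emoji_list.append(" ")
-- 	repeated = 1
-- 	for position in range(len(emoji_list)-1):
-- 		start = emoji_list[position]
-- 		nexts = emoji_list[position+1]
-- 		if start == nexts:
-- 			repeated += 1
-- 		else:
-- 			if repeated > 3:
-- 				repeated = 3
-- 			if start not in output_dict:
-- 				output_dict[start] = {}
-- 				output_dict[start][1] = 0
-- 				output_dict[start][2] = 0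
-- 				output_dict[start][3] = 0
-- 			output_dict[start][repeated] += 1
-- 			repeated = 1
-- 	return output_dict
-- ===== SOURCE B (Python) =====
-- # Two-phase rewrite: first run-length-encode the list (with the trailing " " sentinel,
-- # which A also appends -- the mutation of emoji_list is preserved), then tally the
-- # runs except the last one (A never flushes the final run).  Same in-place updates
-- # of output_dict; return value identical to A's.
--
-- def _run_len(k, xs):
--     """Length of the prefix of xs consisting of elements equal to k."""
--     n = 0
--     for x in xs:
--         if x != k:
--             break
--         n += 1
--     return n
--
-- def _runs(xs):
--     """Run-length encoding of xs as a list of (value, length) pairs."""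
--     if not xs:
--         return []
--     n = _run_len(xs[0], xs[1:])
--     return [(xs[0], n + 1)] + _runs(xs[n + 1:])
--
-- def typing_behavior(emoji_list, output_dict):
--     """ Record typing behavior """
--     emoji_list.append(" ")
--     for key, n in _runs(emoji_list)[:-1]:
--         c = n if n < 3 else 3
--         if key not in output_dict:
--             output_dict[key] = {1: 0, 2: 0, 3: 0}
--         output_dict[key][c] += 1
--     return output_dict
-- ===== Notes on version B (the rewrite author's own statement) =====
-- stated objective: alternative
-- what changed: A interleaves run detection and tallying in one index loop over adjacent pairs with a 'repeated' counter; B first run-length-encodes the list (sentinel included) into explicit (value, length) runs and then tallies all runs but the last in a second pass, with no pairwise comparison or carried counter.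
import Mathlib
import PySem

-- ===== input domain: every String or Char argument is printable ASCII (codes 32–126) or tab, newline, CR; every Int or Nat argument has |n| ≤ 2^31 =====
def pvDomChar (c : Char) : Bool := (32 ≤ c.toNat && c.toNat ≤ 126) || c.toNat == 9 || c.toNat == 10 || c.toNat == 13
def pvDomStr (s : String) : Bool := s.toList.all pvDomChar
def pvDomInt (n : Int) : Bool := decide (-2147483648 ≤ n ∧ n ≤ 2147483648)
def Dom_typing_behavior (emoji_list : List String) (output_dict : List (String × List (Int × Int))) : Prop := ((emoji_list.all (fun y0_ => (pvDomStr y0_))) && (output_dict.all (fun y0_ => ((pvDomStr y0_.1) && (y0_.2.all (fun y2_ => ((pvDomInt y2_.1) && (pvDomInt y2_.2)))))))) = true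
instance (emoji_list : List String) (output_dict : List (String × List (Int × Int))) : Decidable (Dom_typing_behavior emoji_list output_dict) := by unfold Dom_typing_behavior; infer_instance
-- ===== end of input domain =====

-- B replaces A's single pairwise-comparison loop by a two-phase decomposition (run-length
-- encode, then tally all runs but the last); same cost, both mutate emoji_list (append " ")
-- and output_dict in place — the equivalence proved here is about the returned value.


-- ===== PORT A =====
-- A-side helper: the body of A's for-loop for one adjacent pair (start, nexts);
-- state = (output_dict, repeated).
def pvStepA (st : PySem.Dict String (PySem.Dict Int Int) × Int) (start nexts : String) :
    PySem.Dict String (PySem.Dict Int Int) × Int :=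
  if start == nexts then (st.1, st.2 + 1)
  else
    let repeated : Int := if st.2 > 3 then 3 else st.2
    let od :=
      if st.1.contains start then st.1
      else
        -- output_dict[start] = {}; output_dict[start][1] = 0; ...[2] = 0; ...[3] = 0
        ((((st.1.insert start PySem.Dict.empty).modify start PySem.Dict.empty
            (fun d => d.insert 1 0)).modify start PySem.Dict.empty
            (fun d => d.insert 2 0)).modify start PySem.Dict.empty
            (fun d => d.insert 3 0))
    -- output_dict[start][repeated] += 1  (Python raises KeyError when 'repeated' is
    -- missing in the inner dict; those inputs are excluded by Pre_)
    (od.modify start PySem.Dict.empty (fun d => d.modify repeated 0 (· + 1)), 1)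

def typing_behavior (emoji_list : List String) (output_dict : List (String × List (Int × Int))) : List (String × List (Int × Int)) :=
  let el := emoji_list ++ [" "]          -- emoji_list.append(" ")
  let od0 : PySem.Dict String (PySem.Dict Int Int) :=
    PySem.Dict.mk (output_dict.map (fun p => (p.1, PySem.Dict.mk p.2)))
  -- for position in range(len(emoji_list)-1): both indices are < el.length, so getD is exact
  let res := (List.range (el.length - 1)).foldl
    (fun st position => pvStepA st (el.getD position "") (el.getD (position + 1) "")) (od0, 1)
  res.1.items.map (fun p => (p.1, p.2.items))

-- ===== PORT B =====
-- B-side helpers (transliterations of _run_len and _runs from Source B)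
def pvRunLen (k : String) : List String → Nat
  | [] => 0
  | x :: rest => if x == k then pvRunLen k rest + 1 else 0   -- break → stop counting

def pvRuns : List String → List (String × Nat)
  | [] => []
  | x :: rest =>
    let n := pvRunLen x rest
    (x, n + 1) :: pvRuns (rest.drop n)
termination_by xs => xs.length
decreasing_by simp

-- the body of B's for-loop for one run (key, n)
def pvStepB (od : PySem.Dict String (PySem.Dict Int Int)) (kn : String × Nat) :
    PySem.Dict String (PySem.Dict Int Int) :=
  let c : Int := if kn.2 < 3 then (kn.2 : Int) else 3
  let od := if od.contains kn.1 then od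
            else od.insert kn.1 (PySem.Dict.mk [(1, 0), (2, 0), (3, 0)])
  od.modify kn.1 PySem.Dict.empty (fun d => d.modify c 0 (· + 1))

def typing_behavior_alt (emoji_list : List String) (output_dict : List (String × List (Int × Int))) : List (String × List (Int × Int)) :=
  let el := emoji_list ++ [" "]          -- emoji_list.append(" ")
  let od0 : PySem.Dict String (PySem.Dict Int Int) :=
    PySem.Dict.mk (output_dict.map (fun p => (p.1, PySem.Dict.mk p.2)))
  let res := ((pvRuns el).dropLast).foldl pvStepB od0    -- for key, n in _runs(emoji_list)[:-1]
  res.items.map (fun p => (p.1, p.2.items))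

-- ===== PRECONDITION & SPEC =====
-- Pre_-helper: does el (the emoji list with its sentinel) contain a run of key k that is
-- flushed (its end is followed by a different element) with capped length c ∈ {1,2,3}?
-- All indices inspected are in range, so the getD defaults are never consulted.
def pvHit (el : List String) (k : String) (c : Int) : Bool :=
  (List.range (el.length - 1)).any fun i =>
    el.getD i "" == k && el.getD (i + 1) "" != k &&
    ( (c == 1 && (i == 0 || el.getD (i - 1) "" != k))
   || (c == 2 && decide (1 ≤ i) && el.getD (i - 1) "" == k && (i == 1 || el.getD (i - 2) "" != k))
   || (c == 3 && decide (2 ≤ i) && el.getD (i - 1) "" == k && el.getD (i - 2) "" == k))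

-- Pre_ excludes (a) association lists with duplicate outer or inner keys, which no Python
-- dict represents, and (b) exactly the inputs on which A raises: when a run of a
-- pre-existing key k is flushed with capped length c but c is missing from k's counter
-- table, Python's `output_dict[start][repeated] += 1` raises KeyError.
def Pre_typing_behavior (emoji_list : List String) (output_dict : List (String × List (Int × Int))) : Prop :=
  (output_dict.map Prod.fst).Nodup ∧
  ∀ p ∈ output_dict, (p.2.map Prod.fst).Nodup ∧
    ∀ c ∈ ([1, 2, 3] : List Int),
      pvHit (emoji_list ++ [" "]) p.1 c = true → c ∈ p.2.map Prod.fst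
instance (emoji_list : List String) (output_dict : List (String × List (Int × Int))) : Decidable (Pre_typing_behavior emoji_list output_dict) := by unfold Pre_typing_behavior; infer_instance

def pvWitness_typing_behavior : List String × (List (String × List (Int × Int))) :=
  (["a", "a", "b"], [("b", [(1, 0), (2, 0), (3, 0)])])

def Spec_typing_behavior (emoji_list : List String) (output_dict : List (String × List (Int × Int))) (out : List (String × List (Int × Int))) : Prop := out = typing_behavior_alt emoji_list output_dict
instance (emoji_list : List String) (output_dict : List (String × List (Int × Int))) (out : List (String × List (Int × Int))) : Decidable (Spec_typing_behavior emoji_list output_dict out) := by unfold Spec_typing_behavior; infer_instance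

-- ===== CLAIM (what is proved, stated in full; the proofs are below) =====
def Claim_equal_typing_behavior : Prop := ∀ (emoji_list : List String) (output_dict : List (String × List (Int × Int))), Dom_typing_behavior emoji_list output_dict → Pre_typing_behavior emoji_list output_dict → Spec_typing_behavior emoji_list output_dict (typing_behavior emoji_list output_dict)

-- ===== LEMMAS AND PROOFS =====
-- (the two ports in fact agree on EVERY input; Pre_ marks where the Pythons return)

-- A's index loop, rephrased as structural recursion over adjacent pairs
def pvAPairs : List String → PySem.Dict String (PySem.Dict Int Int) × Int →
    PySem.Dict String (PySem.Dict Int Int) × Int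
  | a :: b :: rest, st => pvAPairs (b :: rest) (pvStepA st a b)
  | _, st => st

lemma pvA_range_eq_pairs (l : List String) (st : PySem.Dict String (PySem.Dict Int Int) × Int) :
    (List.range (l.length - 1)).foldl
      (fun st position => pvStepA st (l.getD position "") (l.getD (position + 1) "")) st
      = pvAPairs l st := by
  induction l generalizing st with
  | nil => simp [pvAPairs]
  | cons a t ih =>
    match t with
    | [] => simp [pvAPairs]
    | b :: u =>
      have hlen : (a :: b :: u).length - 1 = (b :: u).length - 1 + 1 := by simp
      rw [hlen, List.range_succ_eq_map, List.foldl_cons, List.foldl_map]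
      show List.foldl (fun st i =>
        pvStepA st ((a :: b :: u).getD (i + 1) "") ((a :: b :: u).getD (i + 1 + 1) "")) _ _ = _
      simp only [List.getD_cons_succ, List.getD_cons_zero]
      rw [show pvAPairs (a :: b :: u) st = pvAPairs (b :: u) (pvStepA st a b) from rfl]
      exact ih _

-- B's step on an Int run length (what A's flush produces)
def pvStepBI (od : PySem.Dict String (PySem.Dict Int Int)) (kn : String × Int) :
    PySem.Dict String (PySem.Dict Int Int) :=
  let c : Int := if kn.2 < 3 then kn.2 else 3
  let od := if od.contains kn.1 then od
            else od.insert kn.1 (PySem.Dict.mk [(1, 0), (2, 0), (3, 0)])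
  od.modify kn.1 PySem.Dict.empty (fun d => d.modify c 0 (· + 1))

-- a modify right after an insert at the same key is one insert of the modified value
lemma pvModifyInsert {κ ν : Type} [BEq κ] [LawfulBEq κ] (d : PySem.Dict κ ν) (k : κ) (v d0 : ν)
    (f : ν → ν) : (d.insert k v).modify k d0 f = d.insert k (f v) := by
  simp [PySem.Dict.modify, PySem.Dict.getD_insert_self, PySem.Dict.insert_insert_self]

-- A's flush (else-branch of pvStepA) is exactly pvStepBI
lemma pvStepA_flush (od : PySem.Dict String (PySem.Dict Int Int)) (r : Int) (a b : String)
    (h : (a == b) = false) : pvStepA (od, r) a b = (pvStepBI od (a, r), 1) := by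
  unfold pvStepA pvStepBI
  rw [h]
  simp only [Bool.false_eq_true, if_false, pvModifyInsert]
  have hc : (if r > 3 then (3 : Int) else r) = (if r < 3 then r else 3) := by split_ifs <;> omega
  rw [hc]
  rfl

def pvRunsI (l : List String) : List (String × Int) :=
  (pvRuns l).map (fun p => (p.1, (p.2 : Int)))

lemma pvCore : ∀ (rest : List String) (k : String)
    (od : PySem.Dict String (PySem.Dict Int Int)) (r : Int),
    (pvAPairs (k :: rest) (od, r)).1 =
      (((k, r + (pvRunLen k rest : Int)) :: pvRunsI (rest.drop (pvRunLen k rest))).dropLast).foldl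
        pvStepBI od := by
  intro rest
  induction rest with
  | nil => intro k od r; simp [pvAPairs, pvRunLen, pvRunsI, pvRuns]
  | cons b u ih =>
    intro k od r
    by_cases hb : b = k
    · subst hb
      have h1 : pvRunLen b (b :: u) = pvRunLen b u + 1 := by simp [pvRunLen]
      have h2 : pvAPairs (b :: b :: u) (od, r) = pvAPairs (b :: u) (od, r + 1) := by
        simp [pvAPairs, pvStepA]
      rw [h2, ih b od (r + 1)]
      have hc : (r : Int) + ((pvRunLen b (b :: u) : Nat) : Int)
          = r + 1 + ((pvRunLen b u : Nat) : Int) := by rw [h1]; push_cast; ring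
      rw [hc, h1, List.drop_succ_cons]
    · have hkb : (k == b) = false := beq_eq_false_iff_ne.mpr (Ne.symm hb)
      have h1 : pvRunLen k (b :: u) = 0 := by simp [pvRunLen, hb]
      have h2 : pvAPairs (k :: b :: u) (od, r) = pvAPairs (b :: u) (pvStepBI od (k, r), 1) := by
        show pvAPairs (b :: u) (pvStepA (od, r) k b) = _
        rw [pvStepA_flush od r k b hkb]
      have h3 : pvRunsI (b :: u)
          = (b, ((pvRunLen b u + 1 : Nat) : Int)) :: pvRunsI (u.drop (pvRunLen b u)) := by
        rw [pvRunsI, pvRuns]; simp [pvRunsI]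
      rw [h2, ih b _ 1, h1]
      simp only [List.drop_zero]
      rw [h3]
      have hc : ((pvRunLen b u + 1 : Nat) : Int) = 1 + ((pvRunLen b u : Nat) : Int) := by
        push_cast; ring
      rw [hc]
      simp only [List.dropLast_cons₂, List.foldl_cons]
      norm_num

-- pvStepBI on a cast Nat run length is pvStepB
lemma pvBI_step (od : PySem.Dict String (PySem.Dict Int Int)) (k : String) (n : Nat) :
    pvStepBI od (k, (n : Int)) = pvStepB od (k, n) := by
  unfold pvStepBI pvStepB
  have hc : (if (n : Int) < 3 then (n : Int) else 3) = (if n < 3 then (n : Int) else 3) := by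
    split_ifs with h1 h2 <;> first | rfl | omega
  rw [hc]

lemma pvBI_eq_B (runs : List (String × Nat)) (od : PySem.Dict String (PySem.Dict Int Int)) :
    ((runs.map (fun p => (p.1, (p.2 : Int)))).dropLast).foldl pvStepBI od
      = (runs.dropLast).foldl pvStepB od := by
  rw [← List.map_dropLast, List.foldl_map]
  congr 1
  funext od p
  exact pvBI_step od p.1 p.2

lemma pvPairs_eq_runs (l : List String) (od : PySem.Dict String (PySem.Dict Int Int)) :
    (pvAPairs l (od, 1)).1 = ((pvRuns l).dropLast).foldl pvStepB od := by
  cases l with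
  | nil => simp [pvAPairs, pvRuns]
  | cons k rest =>
    rw [pvCore rest k od 1]
    have h3 : pvRunsI (k :: rest)
        = (k, ((pvRunLen k rest + 1 : Nat) : Int)) :: pvRunsI (rest.drop (pvRunLen k rest)) := by
      rw [pvRunsI, pvRuns]; simp [pvRunsI]
    have hc : (1 : Int) + ((pvRunLen k rest : Nat) : Int)
        = ((pvRunLen k rest + 1 : Nat) : Int) := by push_cast; ring
    rw [hc, ← h3, pvRunsI, pvBI_eq_B]

-- ===== VERDICT (by name: the statement is the Claim_ definition above) =====
theorem typing_behavior_spec : Claim_equal_typing_behavior := by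
  intro emoji_list output_dict _ _
  unfold Spec_typing_behavior typing_behavior typing_behavior_alt
  simp only [pvA_range_eq_pairs, pvPairs_eq_runs]
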